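-- pv_equiv track=rewrite | github.com/prithika-sathish/Sales-Lead-Automation | core/normalizer.py | _infer_signal_type
-- ===== SOURCE A (Python) =====
-- def _infer_signal_type(raw_type: str, raw_text: str) -> str:
--     base = f"{raw_type} {raw_text}".lower()
--     if any(token in base for token in ["feature_update", "feature", "roadmap", "release"]):
--         return "feature_update"
--     if any(token in base for token in ["api_update", "api", "endpoint", "webhook"]):
--         return "api_update"
--     if any(token in base for token in ["company_update", "update", "announcement"]):
--         return "company_update"
--     if any(token in base for token in ["competitor_switch", "moving away from", "alternative to", "switch from"]):
--         return "competitor_switch"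
--     if any(token in base for token in ["integration_added", "integration", "connector", "plugin", "marketplace"]):
--         return "integration_added"
--     if any(token in base for token in ["sales_expansion", "sdr", "account executive", "sales hire"]):
--         return "sales_expansion"
--     if any(token in base for token in ["product_maturity", "docs", "api reference", "feature pages"]):
--         return "product_maturity"
--     if any(token in base for token in ["high_momentum", "viral_growth"]):
--         return "momentum"
--     if "narrative_trend" in base:
--         return "narrative_trend"
--     if any(token in base for token in ["feature request", "requested feature", "wish list"]):
--         return "feature_requests"
--     if any(token in base for token in ["traffic", "visitors", "sessions", "pageviews"]):
--         return "traffic_growth"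
--     if any(token in base for token in ["newsletter", "blog", "content", "webinar", "campaign"]):
--         return "content_push"
--     if any(token in base for token in ["hiring", "job", "role", "recruit"]):
--         return "hiring"
--     if any(token in base for token in ["repo", "github", "commit", "release"]):
--         return "github_activity"
--     if any(token in base for token in ["funding", "launch", "milestone", "achievement", "revenue", "client"]):
--         return "milestone"
--     if any(token in base for token in ["complaint", "downtime", "issue", "churn"]):
--         return "customer_pain"
--     return "company_update"
-- ===== SOURCE B (Python) =====
-- _LABELS = [
--     "feature_update", "api_update", "company_update", "competitor_switch",
--     "integration_added", "sales_expansion", "product_maturity", "momentum",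
--     "narrative_trend", "feature_requests", "traffic_growth", "content_push",
--     "hiring", "github_activity", "milestone", "customer_pain",
-- ]
--
-- _GROUPS = [
--     ["feature_update", "feature", "roadmap", "release"],
--     ["api_update", "api", "endpoint", "webhook"],
--     ["company_update", "update", "announcement"],
--     ["competitor_switch", "moving away from", "alternative to", "switch from"],
--     ["integration_added", "integration", "connector", "plugin", "marketplace"],
--     ["sales_expansion", "sdr", "account executive", "sales hire"],
--     ["product_maturity", "docs", "api reference", "feature pages"],
--     ["high_momentum", "viral_growth"],
--     ["narrative_trend"],
--     ["feature request", "requested feature", "wish list"],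
--     ["traffic", "visitors", "sessions", "pageviews"],
--     ["newsletter", "blog", "content", "webinar", "campaign"],
--     ["hiring", "job", "role", "recruit"],
--     ["repo", "github", "commit", "release"],
--     ["funding", "launch", "milestone", "achievement", "revenue", "client"],
--     ["complaint", "downtime", "issue", "churn"],
-- ]
--
-- # flat priority table: every token tagged with its category index
-- _FLAT = [(i, t) for i, toks in enumerate(_GROUPS) for t in toks]
--
--
-- def _infer_signal_type(raw_type: str, raw_text: str) -> str:
--     # The first matching category of A's cascade is exactly the matching
--     # category of minimal index, so one pass keeping the minimum suffices.
--     base = f"{raw_type} {raw_text}".lower()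
--     best = None
--     for i, t in _FLAT:
--         if t in base and (best is None or i < best):
--             best = i
--     return _LABELS[best] if best is not None else "company_update"
-- ===== Notes on version B (the rewrite author's own statement) =====
-- stated objective: alternative
-- what changed: Replaced the sixteen-branch early-return if-cascade by a single accumulator pass over a flat (priority, token) table that keeps the minimal matched priority and indexes a label list at the end; first match of the cascade equals the minimal matched category index.
import Mathlib
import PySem

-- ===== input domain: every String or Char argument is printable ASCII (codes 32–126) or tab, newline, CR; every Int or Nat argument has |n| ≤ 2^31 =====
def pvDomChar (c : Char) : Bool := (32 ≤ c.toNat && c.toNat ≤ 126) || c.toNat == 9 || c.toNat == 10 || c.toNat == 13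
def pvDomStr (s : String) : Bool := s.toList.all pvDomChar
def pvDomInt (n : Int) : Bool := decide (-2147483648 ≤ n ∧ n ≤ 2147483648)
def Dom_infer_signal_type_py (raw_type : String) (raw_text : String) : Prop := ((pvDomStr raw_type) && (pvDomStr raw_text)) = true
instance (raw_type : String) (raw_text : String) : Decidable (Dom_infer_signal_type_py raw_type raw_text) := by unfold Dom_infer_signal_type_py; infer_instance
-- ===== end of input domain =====

-- B replaces A's sixteen-branch if-cascade by one pass over a flat (priority, token) table keeping the minimal matched priority; alternative decomposition, same cost.


-- ===== PORT A =====
-- literal transliteration of A's if-cascade, on the lowered "raw_type raw_text"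
def pvCascadeA (base : String) : String :=
  if [ "feature_update", "feature", "roadmap", "release" ].any (fun t => PySem.Str.isIn t base) then "feature_update"
  else if [ "api_update", "api", "endpoint", "webhook" ].any (fun t => PySem.Str.isIn t base) then "api_update"
  else if [ "company_update", "update", "announcement" ].any (fun t => PySem.Str.isIn t base) then "company_update"
  else if [ "competitor_switch", "moving away from", "alternative to", "switch from" ].any (fun t => PySem.Str.isIn t base) then "competitor_switch"
  else if [ "integration_added", "integration", "connector", "plugin", "marketplace" ].any (fun t => PySem.Str.isIn t base) then "integration_added"
  else if [ "sales_expansion", "sdr", "account executive", "sales hire" ].any (fun t => PySem.Str.isIn t base) then "sales_expansion"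
  else if [ "product_maturity", "docs", "api reference", "feature pages" ].any (fun t => PySem.Str.isIn t base) then "product_maturity"
  else if [ "high_momentum", "viral_growth" ].any (fun t => PySem.Str.isIn t base) then "momentum"
  else if PySem.Str.isIn "narrative_trend" base then "narrative_trend"
  else if [ "feature request", "requested feature", "wish list" ].any (fun t => PySem.Str.isIn t base) then "feature_requests"
  else if [ "traffic", "visitors", "sessions", "pageviews" ].any (fun t => PySem.Str.isIn t base) then "traffic_growth"
  else if [ "newsletter", "blog", "content", "webinar", "campaign" ].any (fun t => PySem.Str.isIn t base) then "content_push"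
  else if [ "hiring", "job", "role", "recruit" ].any (fun t => PySem.Str.isIn t base) then "hiring"
  else if [ "repo", "github", "commit", "release" ].any (fun t => PySem.Str.isIn t base) then "github_activity"
  else if [ "funding", "launch", "milestone", "achievement", "revenue", "client" ].any (fun t => PySem.Str.isIn t base) then "milestone"
  else if [ "complaint", "downtime", "issue", "churn" ].any (fun t => PySem.Str.isIn t base) then "customer_pain"
  else "company_update"

def infer_signal_type_py (raw_type : String) (raw_text : String) : String :=
  pvCascadeA (PySem.Str.lower (raw_type ++ " " ++ raw_text))

-- ===== PORT B =====
def pvLabels : List String :=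
  [ "feature_update", "api_update", "company_update", "competitor_switch",
    "integration_added", "sales_expansion", "product_maturity", "momentum",
    "narrative_trend", "feature_requests", "traffic_growth", "content_push",
    "hiring", "github_activity", "milestone", "customer_pain" ]

def pvGroups : List (List String) :=
  [ ["feature_update", "feature", "roadmap", "release"],
    ["api_update", "api", "endpoint", "webhook"],
    ["company_update", "update", "announcement"],
    ["competitor_switch", "moving away from", "alternative to", "switch from"],
    ["integration_added", "integration", "connector", "plugin", "marketplace"],
    ["sales_expansion", "sdr", "account executive", "sales hire"],
    ["product_maturity", "docs", "api reference", "feature pages"],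
    ["high_momentum", "viral_growth"],
    ["narrative_trend"],
    ["feature request", "requested feature", "wish list"],
    ["traffic", "visitors", "sessions", "pageviews"],
    ["newsletter", "blog", "content", "webinar", "campaign"],
    ["hiring", "job", "role", "recruit"],
    ["repo", "github", "commit", "release"],
    ["funding", "launch", "milestone", "achievement", "revenue", "client"],
    ["complaint", "downtime", "issue", "churn"] ]

-- flat priority table: every token tagged with its category index
def pvFlat : List (Int × String) :=
  (PySem.List.enumerate pvGroups 0).flatMap (fun it => it.2.map (fun t => (it.1, t)))

-- one loop step of Source B's accumulator: keep the minimal matched priority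
def pvStep (base : String) (best : Option Int) (p : Int × String) : Option Int :=
  if PySem.Str.isIn p.2 base && (best.isNone || decide (p.1 < best.getD 0)) then some p.1 else best

def infer_signal_type_py_alt (raw_type : String) (raw_text : String) : String :=
  let base := PySem.Str.lower (raw_type ++ " " ++ raw_text)
  let best := pvFlat.foldl (pvStep base) none
  match best with
  | some i => (PySem.List.pyGet? pvLabels i).getD "company_update"
  | none => "company_update"

-- ===== PRECONDITION & SPEC =====
def Spec_infer_signal_type_py (raw_type : String) (raw_text : String) (out : String) : Prop := out = infer_signal_type_py_alt raw_type raw_text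
instance (raw_type : String) (raw_text : String) (out : String) : Decidable (Spec_infer_signal_type_py raw_type raw_text out) := by unfold Spec_infer_signal_type_py; infer_instance

-- ===== CLAIM (what is proved, stated in full; the proofs are below) =====
def Claim_equal_infer_signal_type_py : Prop := ∀ (raw_type : String) (raw_text : String), Dom_infer_signal_type_py raw_type raw_text → Spec_infer_signal_type_py raw_type raw_text (infer_signal_type_py raw_type raw_text)

-- ===== LEMMAS AND PROOFS =====

-- first-match index over the groups, starting at priority k (proof-side characterisation)
def pvFirst (m : String → Bool) : List (List String) → Int → Option Int
  | [], _ => none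
  | g :: gs, k => if g.any m then some k else pvFirst m gs (k + 1)

-- once the accumulator holds b and every remaining priority is ≥ b, the fold is constant
theorem foldl_step_stay (base : String) (l : List (Int × String)) (b : Int)
    (h : ∀ p ∈ l, b ≤ p.1) :
    l.foldl (pvStep base) (some b) = some b := by
  induction l with
  | nil => rfl
  | cons p l ih =>
      have hb : b ≤ p.1 := h p (List.mem_cons_self ..)
      have : pvStep base (some b) p = some b := by
        simp [pvStep, show ¬ p.1 < b by omega]
      rw [List.foldl_cons, this]
      exact ih (fun q hq => h q (List.mem_cons_of_mem _ hq))

-- fold over one group's tokens (all at priority i) from an empty accumulator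
theorem foldl_step_group (base : String) (g : List String) (i : Int) :
    (g.map (fun t => (i, t))).foldl (pvStep base) none
      = if g.any (fun t => PySem.Str.isIn t base) then some i else none := by
  induction g with
  | nil => rfl
  | cons t ts ih =>
      by_cases h : PySem.Str.isIn t base = true
      · have : pvStep base none (i, t) = some i := by simp [pvStep, h, -PySem.Str.isIn_eq]
        rw [List.map_cons, List.foldl_cons, this,
            foldl_step_stay base _ i (by
              intro p hp
              obtain ⟨t', _, rfl⟩ := List.mem_map.1 hp
              exact le_refl i)]
        simp [h, -PySem.Str.isIn_eq]
      · rw [Bool.not_eq_true] at h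
        have : pvStep base none (i, t) = none := by simp [pvStep, h, -PySem.Str.isIn_eq]
        rw [List.map_cons, List.foldl_cons, this, ih]
        simp [h, -PySem.Str.isIn_eq]

-- every priority in the flat table built from priority k onwards is ≥ k
theorem flat_idx_ge (gs : List (List String)) (k : Int) :
    ∀ p ∈ (PySem.List.enumerate gs k).flatMap (fun it => it.2.map (fun t => (it.1, t))), k ≤ p.1 := by
  intro p hp
  obtain ⟨it, hit, hpt⟩ := List.mem_flatMap.1 hp
  obtain ⟨t, _, rfl⟩ := List.mem_map.1 hpt
  obtain ⟨j, hj, rfl⟩ := (PySem.List.mem_enumerate_iff _ _ _).1 hit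
  simp

-- the min-keeping fold over the flat table computes the first-match index
theorem foldl_step_flat (base : String) (gs : List (List String)) (k : Int) :
    ((PySem.List.enumerate gs k).flatMap (fun it => it.2.map (fun t => (it.1, t)))).foldl
        (pvStep base) none
      = pvFirst (fun t => PySem.Str.isIn t base) gs k := by
  induction gs generalizing k with
  | nil => rfl
  | cons g gs ih =>
      rw [PySem.List.enumerate_cons, List.flatMap_cons, List.foldl_append, foldl_step_group]
      by_cases h : g.any (fun t => PySem.Str.isIn t base) = true
      · rw [if_pos h, foldl_step_stay base _ k (fun p hp => by
          have := flat_idx_ge gs (k + 1) p hp; omega)]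
        simp [pvFirst, h, -PySem.Str.isIn_eq]
      · rw [Bool.not_eq_true] at h
        rw [if_neg (by simp [h, -PySem.Str.isIn_eq]), ih]
        simp [pvFirst, h, -PySem.Str.isIn_eq]

-- unfolding pvFirst on the concrete 16 groups reproduces A's cascade
theorem cascade_eq_first (base : String) :
    pvCascadeA base
      = match pvFirst (fun t => PySem.Str.isIn t base) pvGroups 0 with
        | some i => (PySem.List.pyGet? pvLabels i).getD "company_update"
        | none => "company_update" := by
  unfold pvCascadeA pvGroups
  by_cases h0 : (["feature_update", "feature", "roadmap", "release"] : List String).any (fun t => PySem.Str.isIn t base) = true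
  · simp [pvFirst, h0, pvLabels, PySem.List.pyGet?, PySem.List.pyIdx?, -PySem.Str.isIn_eq]
  rw [Bool.not_eq_true] at h0
  by_cases h1 : (["api_update", "api", "endpoint", "webhook"] : List String).any (fun t => PySem.Str.isIn t base) = true
  · simp [pvFirst, h0, h1, pvLabels, PySem.List.pyGet?, PySem.List.pyIdx?, -PySem.Str.isIn_eq]
  rw [Bool.not_eq_true] at h1
  by_cases h2 : (["company_update", "update", "announcement"] : List String).any (fun t => PySem.Str.isIn t base) = true
  · simp [pvFirst, h0, h1, h2, pvLabels, PySem.List.pyGet?, PySem.List.pyIdx?, -PySem.Str.isIn_eq]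
  rw [Bool.not_eq_true] at h2
  by_cases h3 : (["competitor_switch", "moving away from", "alternative to", "switch from"] : List String).any (fun t => PySem.Str.isIn t base) = true
  · simp [pvFirst, h0, h1, h2, h3, pvLabels, PySem.List.pyGet?, PySem.List.pyIdx?, -PySem.Str.isIn_eq]
  rw [Bool.not_eq_true] at h3
  by_cases h4 : (["integration_added", "integration", "connector", "plugin", "marketplace"] : List String).any (fun t => PySem.Str.isIn t base) = true
  · simp [pvFirst, h0, h1, h2, h3, h4, pvLabels, PySem.List.pyGet?, PySem.List.pyIdx?, -PySem.Str.isIn_eq]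
  rw [Bool.not_eq_true] at h4
  by_cases h5 : (["sales_expansion", "sdr", "account executive", "sales hire"] : List String).any (fun t => PySem.Str.isIn t base) = true
  · simp [pvFirst, h0, h1, h2, h3, h4, h5, pvLabels, PySem.List.pyGet?, PySem.List.pyIdx?, -PySem.Str.isIn_eq]
  rw [Bool.not_eq_true] at h5
  by_cases h6 : (["product_maturity", "docs", "api reference", "feature pages"] : List String).any (fun t => PySem.Str.isIn t base) = true
  · simp [pvFirst, h0, h1, h2, h3, h4, h5, h6, pvLabels, PySem.List.pyGet?, PySem.List.pyIdx?, -PySem.Str.isIn_eq]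
  rw [Bool.not_eq_true] at h6
  by_cases h7 : (["high_momentum", "viral_growth"] : List String).any (fun t => PySem.Str.isIn t base) = true
  · simp [pvFirst, h0, h1, h2, h3, h4, h5, h6, h7, pvLabels, PySem.List.pyGet?, PySem.List.pyIdx?, -PySem.Str.isIn_eq]
  rw [Bool.not_eq_true] at h7
  by_cases h8 : PySem.Str.isIn "narrative_trend" base = true
  · simp [pvFirst, h0, h1, h2, h3, h4, h5, h6, h7, h8, pvLabels, PySem.List.pyGet?, PySem.List.pyIdx?, -PySem.Str.isIn_eq]
  rw [Bool.not_eq_true] at h8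
  by_cases h9 : (["feature request", "requested feature", "wish list"] : List String).any (fun t => PySem.Str.isIn t base) = true
  · simp [pvFirst, h0, h1, h2, h3, h4, h5, h6, h7, h8, h9, pvLabels, PySem.List.pyGet?, PySem.List.pyIdx?, -PySem.Str.isIn_eq]
  rw [Bool.not_eq_true] at h9
  by_cases h10 : (["traffic", "visitors", "sessions", "pageviews"] : List String).any (fun t => PySem.Str.isIn t base) = true
  · simp [pvFirst, h0, h1, h2, h3, h4, h5, h6, h7, h8, h9, h10, pvLabels, PySem.List.pyGet?, PySem.List.pyIdx?, -PySem.Str.isIn_eq]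
  rw [Bool.not_eq_true] at h10
  by_cases h11 : (["newsletter", "blog", "content", "webinar", "campaign"] : List String).any (fun t => PySem.Str.isIn t base) = true
  · simp [pvFirst, h0, h1, h2, h3, h4, h5, h6, h7, h8, h9, h10, h11, pvLabels, PySem.List.pyGet?, PySem.List.pyIdx?, -PySem.Str.isIn_eq]
  rw [Bool.not_eq_true] at h11
  by_cases h12 : (["hiring", "job", "role", "recruit"] : List String).any (fun t => PySem.Str.isIn t base) = true
  · simp [pvFirst, h0, h1, h2, h3, h4, h5, h6, h7, h8, h9, h10, h11, h12, pvLabels, PySem.List.pyGet?, PySem.List.pyIdx?, -PySem.Str.isIn_eq]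
  rw [Bool.not_eq_true] at h12
  by_cases h13 : (["repo", "github", "commit", "release"] : List String).any (fun t => PySem.Str.isIn t base) = true
  · simp [pvFirst, h0, h1, h2, h3, h4, h5, h6, h7, h8, h9, h10, h11, h12, h13, pvLabels, PySem.List.pyGet?, PySem.List.pyIdx?, -PySem.Str.isIn_eq]
  rw [Bool.not_eq_true] at h13
  by_cases h14 : (["funding", "launch", "milestone", "achievement", "revenue", "client"] : List String).any (fun t => PySem.Str.isIn t base) = true
  · simp [pvFirst, h0, h1, h2, h3, h4, h5, h6, h7, h8, h9, h10, h11, h12, h13, h14, pvLabels, PySem.List.pyGet?, PySem.List.pyIdx?, -PySem.Str.isIn_eq]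
  rw [Bool.not_eq_true] at h14
  by_cases h15 : (["complaint", "downtime", "issue", "churn"] : List String).any (fun t => PySem.Str.isIn t base) = true
  · simp [pvFirst, h0, h1, h2, h3, h4, h5, h6, h7, h8, h9, h10, h11, h12, h13, h14, h15, pvLabels, PySem.List.pyGet?, PySem.List.pyIdx?, -PySem.Str.isIn_eq]
  rw [Bool.not_eq_true] at h15
  simp [pvFirst, h0, h1, h2, h3, h4, h5, h6, h7, h8, h9, h10, h11, h12, h13, h14, h15, -PySem.Str.isIn_eq]

-- ===== VERDICT (by name: the statement is the Claim_ definition above) =====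
theorem infer_signal_type_py_spec : Claim_equal_infer_signal_type_py := by
  intro raw_type raw_text _
  unfold Spec_infer_signal_type_py infer_signal_type_py infer_signal_type_py_alt
  simp only [pvFlat, foldl_step_flat]
  exact cascade_eq_first _
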